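-- pv_equiv track=rewrite | github.com/moongoby-GO100/aads-server | app/api/project_dashboard.py | _project_from_task_id
-- ===== SOURCE A (Python) =====
-- def _project_from_task_id(task_id: str):
--     """T-107: task_id에서 프로젝트 직접 판별.
--     AADS-095 → 'AADS', KIS-168 → 'KIS', T-095 → None (기존 _classify_project 폴백 필요)
--     """
--     REVERSE_MAP = {
--         "AADS": "AADS", "KIS": "KIS", "GO100": "GO100",
--         "SF": "ShortFlow", "NT": "NewTalk", "SALES": "SALES", "NAS": "NAS",
--     }
--     for prefix, project in REVERSE_MAP.items():
--         if task_id.startswith(f"{prefix}-"):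
--             return project
--     return None  # T-xxx는 기존 _classify_project 사용
-- ===== SOURCE B (Python) =====
-- def _project_from_task_id(task_id: str):
--     """T-107: task_id에서 프로젝트 직접 판별 (parse once + direct dict lookup)."""
--     REVERSE_MAP = {
--         "AADS": "AADS", "KIS": "KIS", "GO100": "GO100",
--         "SF": "ShortFlow", "NT": "NewTalk", "SALES": "SALES", "NAS": "NAS",
--     }
--     i = task_id.find("-")
--     if i < 0:
--         return None
--     return REVERSE_MAP.get(task_id[:i])
-- ===== Notes on version B (the rewrite author's own statement) =====
-- stated objective: idiomatic
-- what changed: Instead of scanning all dict entries with a per-entry startswith test, B finds the first dash once, slices off the leading segment and does a single direct dict lookup (the dict is used as an index, not iterated).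
import Mathlib
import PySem

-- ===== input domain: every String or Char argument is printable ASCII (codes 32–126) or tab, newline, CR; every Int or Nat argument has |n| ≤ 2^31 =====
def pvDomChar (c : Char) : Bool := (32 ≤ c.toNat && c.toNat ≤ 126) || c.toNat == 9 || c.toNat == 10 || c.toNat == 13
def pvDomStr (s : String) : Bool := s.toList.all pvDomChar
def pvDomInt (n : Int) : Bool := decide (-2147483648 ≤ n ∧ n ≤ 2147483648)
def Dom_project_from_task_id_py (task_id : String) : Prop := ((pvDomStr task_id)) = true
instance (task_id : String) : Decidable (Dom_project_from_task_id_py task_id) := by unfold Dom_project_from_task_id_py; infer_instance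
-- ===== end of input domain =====

-- B replaces A's per-entry startswith scan over the dict by parsing the leading
-- '-'-delimited segment once and doing a single direct dict lookup (objective: idiomatic).

-- ===== PORT A =====
-- the literal dict REVERSE_MAP (keys are distinct literals)
def pvReverseMap : PySem.Dict String String :=
  PySem.Dict.mk [("AADS", "AADS"), ("KIS", "KIS"), ("GO100", "GO100"),
    ("SF", "ShortFlow"), ("NT", "NewTalk"), ("SALES", "SALES"), ("NAS", "NAS")]

-- the 'for prefix, project in REVERSE_MAP.items(): if task_id.startswith(f"{prefix}-"): return project' loop
def pvGoA (task_id : String) : List (String × String) → Option String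
  | [] => none
  | (pfx, project) :: rest =>
      if PySem.Str.startswith task_id (pfx ++ "-") then some project else pvGoA task_id rest

def project_from_task_id_py (task_id : String) : Option String :=
  pvGoA task_id pvReverseMap.items

-- ===== PORT B =====
def project_from_task_id_py_alt (task_id : String) : Option String :=
  let i := PySem.Str.find task_id "-"
  if i < 0 then none
  else pvReverseMap.get? (PySem.Str.slice task_id none (some i))

-- ===== PRECONDITION & SPEC =====
def Spec_project_from_task_id_py (task_id : String) (out : Option String) : Prop := out = project_from_task_id_py_alt task_id
instance (task_id : String) (out : Option String) : Decidable (Spec_project_from_task_id_py task_id out) := by unfold Spec_project_from_task_id_py; infer_instance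

-- ===== CLAIM (what is proved, stated in full; the proofs are below) =====
def Claim_equal_project_from_task_id_py : Prop := ∀ (task_id : String), Dom_project_from_task_id_py task_id → Spec_project_from_task_id_py task_id (project_from_task_id_py task_id)

-- ===== LEMMAS AND PROOFS =====

-- 'p + "-" is a prefix of s' forces '-' to occur in s
theorem pv_startswith_dash_infix {s p : List Char} (h : (p ++ ['-']) <+: s) :
    ['-'] <:+: s :=
  List.IsInfix.trans ⟨p, [], by simp⟩ h.isInfix

-- with '-' absent from both p and u, 'p + "-" prefixes u + "-" + v' pins p to the whole first segment u
theorem pv_prefix_dash_iff {p u : List Char} (v : List Char)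
    (hu : '-' ∉ u) (hp : '-' ∉ p) :
    (p ++ ['-']) <+: (u ++ '-' :: v) ↔ p = u := by
  constructor
  · induction p generalizing u with
    | nil =>
      intro h
      cases u with
      | nil => rfl
      | cons c u' =>
        obtain ⟨t, ht⟩ := h
        simp only [List.nil_append, List.cons_append, List.cons.injEq] at ht
        exact absurd (by simp [← ht.1]) hu
    | cons a p' ih =>
      intro h
      cases u with
      | nil =>
        obtain ⟨t, ht⟩ := h
        simp only [List.cons_append, List.nil_append, List.cons.injEq] at ht
        exact absurd (by simp [ht.1]) hp
      | cons c u' =>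
        obtain ⟨t, ht⟩ := h
        simp only [List.cons_append, List.cons.injEq] at ht
        have hp' : '-' ∉ p' := fun hm => hp (List.mem_cons_of_mem _ hm)
        have hu' : '-' ∉ u' := fun hm => hu (List.mem_cons_of_mem _ hm)
        have hrec : p' = u' := ih hu' hp' ⟨t, by simpa using ht.2⟩
        simp [ht.1, hrec]
  · rintro rfl
    exact ⟨v, by simp⟩

-- no '-' in task_id: every startswith test of A's loop fails
theorem pv_goA_no_dash {t : String} (h : ¬ ['-'] <:+: t.toList) (l : List (String × String)) :
    pvGoA t l = none := by
  induction l with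
  | nil => rfl
  | cons kv rest ih =>
    obtain ⟨pfx, project⟩ := kv
    simp only [pvGoA, ih]
    rw [if_neg]
    intro hsw
    simp only [PySem.Str.startswith_eq, String.toList_append] at hsw
    have hpre : (pfx.toList ++ ['-']) <+: t.toList :=
      (PySem.Chars.startswith_iff _ _).mp hsw
    exact h (pv_startswith_dash_infix hpre)

-- helper: an in-range '-' inside s yields an occurrence of ['-'] at that index
theorem pv_dash_at {s : List Char} {j : Nat} (hj : j < s.length) (h : s[j] = '-') :
    ['-'] <+: s.drop j := by
  rw [List.drop_eq_getElem_cons hj, h]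
  exact ⟨s.drop (j + 1), rfl⟩

-- '-' occurs: A's loop over an assoc list with dash-free keys is exactly the first-match lookup of the first segment u
theorem pv_goA_lookup {t : String} {u v : List Char} (hs : t.toList = u ++ '-' :: v) (hu : '-' ∉ u)
    (l : List (String × String)) (hl : ∀ kv ∈ l, '-' ∉ kv.1.toList) :
    pvGoA t l = (PySem.Dict.mk l).get? (String.ofList u) := by
  induction l with
  | nil => rfl
  | cons kv rest ih =>
    obtain ⟨pfx, project⟩ := kv
    have hpfx : '-' ∉ pfx.toList := hl _ List.mem_cons_self
    have hrest : ∀ kv ∈ rest, '-' ∉ kv.1.toList := fun kv hm => hl kv (List.mem_cons_of_mem _ hm)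
    have hcond : PySem.Str.startswith t (pfx ++ "-") = (pfx == String.ofList u) := by
      rw [Bool.eq_iff_iff]
      simp only [PySem.Str.startswith_eq, String.toList_append, PySem.Chars.startswith_iff,
        beq_iff_eq]
      rw [show ("-" : String).toList = ['-'] from rfl, hs, pv_prefix_dash_iff v hu hpfx]
      constructor
      · intro hpu
        exact String.toList_inj.mp (by simp [hpu])
      · intro hpu
        rw [hpu]
        simp
    simp only [pvGoA, hcond, PySem.Dict.get?_mk_cons, ih hrest]

-- ===== VERDICT (by name: the statement is the Claim_ definition above) =====
theorem project_from_task_id_py_spec : Claim_equal_project_from_task_id_py := by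
  intro task_id _
  unfold Spec_project_from_task_id_py project_from_task_id_py project_from_task_id_py_alt
  have hfind : PySem.Str.find task_id "-" = PySem.Chars.find task_id.toList ['-'] :=
    PySem.Str.find_eq task_id "-"
  by_cases hneg : PySem.Chars.find task_id.toList ['-'] < 0
  · -- no dash in task_id: both sides are none
    have h1 : PySem.Chars.find task_id.toList ['-'] = -1 :=
      le_antisymm (by omega) (PySem.Chars.neg_one_le_find task_id.toList ['-'])
    have hninf : ¬ (['-'] : List Char) <:+: task_id.toList :=
      (PySem.Chars.find_eq_neg_one_iff _ _).mp h1
    rw [pv_goA_no_dash hninf]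
    rw [hfind]
    simp [hneg]
  · push Not at hneg
    have hspec := PySem.Chars.find_spec (s := task_id.toList) (sub := ['-']) hneg
    set i : Int := PySem.Chars.find task_id.toList ['-'] with hi
    obtain ⟨v, hv⟩ := hspec.1
    have hlen : i.toNat < task_id.toList.length := by
      by_contra hge
      push Not at hge
      rw [List.drop_eq_nil_of_le hge] at hv
      simp at hv
    have hdec : task_id.toList = task_id.toList.take i.toNat ++ '-' :: v := by
      conv_lhs => rw [← List.take_append_drop i.toNat task_id.toList]
      rw [← hv]
      simp
    set u : List Char := task_id.toList.take i.toNat with hu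
    have hnu : '-' ∉ u := by
      intro hm
      obtain ⟨j, hj, hjval⟩ := List.getElem_of_mem hm
      have hjlt : j < i.toNat := by
        rw [hu, List.length_take] at hj
        omega
      have hjs : task_id.toList[j]'(by omega) = '-' := by
        have h2 := hjval
        simp only [hu, List.getElem_take] at h2
        exact h2
      exact hspec.2 j hjlt (pv_dash_at (by omega) hjs)
    have hA : pvGoA task_id pvReverseMap.items =
        (PySem.Dict.mk pvReverseMap.items).get? (String.ofList u) :=
      pv_goA_lookup hdec hnu pvReverseMap.items (by decide)
    have hslice : PySem.Str.slice task_id none (some i) = String.ofList u := by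
      apply String.toList_inj.mp
      rw [PySem.Str.toList_slice, PySem.Chars.slice_eq_listSlice, PySem.List.slice_to _ hneg]
      simp [hu]
    rw [hA, hfind, if_neg (by omega), hslice]
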